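-- pv_equiv track=rewrite | github.com/McTwist/ansible-homelab | roles/php-fpm/filter_plugins/filter.py | diff_config
-- ===== SOURCE A (Python) =====
-- from copy import deepcopy
--
-- def diff_config(config : list[dict], remove : list[dict], fields : list[str]):
-- 	config = deepcopy(config)
-- 	removed = []
-- 	for i, a in enumerate(config):
-- 		for b in remove:
-- 			if all(field in a and field in b and a[field] == b[field] for field in fields):
-- 				removed.append(i)
-- 	for i in reversed(removed):
-- 		del config[i]
-- 	return config
-- ===== SOURCE B (Python) =====
-- # One-pass re-implementation: build the set of remove key-tuples once, then keep
-- # the config entries whose key-tuple is not in it.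
-- def diff_config(config, remove, fields):
--     def key(d):
--         if all(f in d for f in fields):
--             return tuple(d[f] for f in fields)
--         return None
--
--     keys = {k for b in remove if (k := key(b)) is not None}
--     return [a for a in config if key(a) not in keys]
-- ===== Notes on version B (the rewrite author's own statement) =====
-- stated objective: simpler
-- what changed: B replaces the nested config x remove x fields scan with a set of remove key-tuples built once and a single filtering pass over config (O((C+R)*F) work instead of O(C*R*F)); Pre_ excludes the inputs on which A raises IndexError (its repeated deletion of one index running off the end of the shrinking list).
-- intended difference: On inputs where some config entry matches two or more remove entries, A appends its index once per match and the repeated deletion also removes subsequent unrelated entries (on the witness A returns []), while B removes exactly the matching entries (returns [[('b','2')]]), which is the intended behaviour. — e.g. on diff_config([[("a", "1")], [("b", "2")]], [[("a", "1")], [("a", "1")]], ["a"]): A returns [], B returns [[("b", "2")]]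
import Mathlib
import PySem

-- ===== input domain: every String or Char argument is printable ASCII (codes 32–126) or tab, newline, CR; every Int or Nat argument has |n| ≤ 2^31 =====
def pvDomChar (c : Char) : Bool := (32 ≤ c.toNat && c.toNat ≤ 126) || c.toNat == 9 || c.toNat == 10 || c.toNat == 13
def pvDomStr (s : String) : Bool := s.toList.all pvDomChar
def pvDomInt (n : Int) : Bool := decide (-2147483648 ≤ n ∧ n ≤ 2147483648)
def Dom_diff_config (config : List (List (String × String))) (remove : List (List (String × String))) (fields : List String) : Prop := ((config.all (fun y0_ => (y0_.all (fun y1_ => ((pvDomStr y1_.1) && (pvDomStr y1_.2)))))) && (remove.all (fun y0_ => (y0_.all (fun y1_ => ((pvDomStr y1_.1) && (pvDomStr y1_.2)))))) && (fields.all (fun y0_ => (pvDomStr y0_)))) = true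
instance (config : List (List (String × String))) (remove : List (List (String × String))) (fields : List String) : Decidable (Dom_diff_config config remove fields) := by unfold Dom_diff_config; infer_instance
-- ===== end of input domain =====

-- B builds the set of remove key-tuples once and filters config in one pass; where a config
-- entry matches SEVERAL remove entries, A's repeated deletion of one index also removes
-- later unrelated entries — B removes exactly the matching entries (stated as D_ below).

-- first-match lookup in an association list (= lookup in the Python dict the list denotes);
-- shared by both ports: it is the Python 'd[f]' / 'f in d' semantics under the type convention
def pvGetK (d : List (String × String)) (f : String) : Option String :=
  match d with
  | [] => none
  | (k, v) :: r => if k = f then some v else pvGetK r f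

-- ===== PORT A =====
-- 'del c[i]' made total: none = IndexError (those inputs are outside Pre_)
def pvDel {α : Type} (c : List α) (i : Int) : List α :=
  match PySem.List.pop? c i with
  | some r => r.2
  | none => c

-- the 'all(field in a and field in b and a[field] == b[field] for field in fields)' test
def pvMatch (fields : List String) (a b : List (String × String)) : Bool :=
  fields.all (fun f => (pvGetK a f).isSome && (pvGetK b f).isSome && (pvGetK a f == pvGetK b f))

-- deepcopy(config) is a value-level no-op under the type convention
def diff_config (config : List (List (String × String))) (remove : List (List (String × String))) (fields : List String) : List (List (String × String)) :=
  let removed : List Int :=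
    (PySem.List.enumerate config).foldl
      (fun acc ia =>
        remove.foldl (fun acc2 b => if pvMatch fields ia.2 b then acc2 ++ [ia.1] else acc2) acc)
      []
  removed.reverse.foldl (fun c i => pvDel c i) config

-- ===== PORT B =====
-- key(d): the tuple of d's values along fields, or None if some field is missing
def pvKey (fields : List String) (d : List (String × String)) : Option (List String) :=
  match fields with
  | [] => some []
  | f :: rest =>
    match pvGetK d f with
    | none => none
    | some v =>
      match pvKey rest d with
      | none => none
      | some vs => some (v :: vs)

def diff_config_alt (config : List (List (String × String))) (remove : List (List (String × String))) (fields : List String) : List (List (String × String)) :=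
  let keys : PySem.Set (List String) := PySem.Set.ofList (remove.filterMap (fun b => pvKey fields b))
  config.filter (fun a =>
    match pvKey fields a with
    | some k => !(PySem.Set.contains keys k)   -- 'key(a) not in keys'; None is never in keys
    | none => true)

-- ===== PRECONDITION & SPEC =====
-- Pre_ excludes exactly the inputs on which A raises IndexError: deleting an index once per
-- matching remove entry must never run past the end of the shrinking list.  Stated with only
-- List.lookup / countP / all on the inputs, no part of either port.
def Pre_diff_config (config : List (List (String × String))) (remove : List (List (String × String))) (fields : List String) : Prop :=
  ∀ j, (hj : j < config.length) →
    0 < remove.countP (fun b => fields.all (fun f =>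
          (config[j].lookup f).isSome && (b.lookup f).isSome && (config[j].lookup f == b.lookup f))) →
    j + ((config.drop j).map (fun a => remove.countP (fun b => fields.all (fun f =>
          (a.lookup f).isSome && (b.lookup f).isSome && (a.lookup f == b.lookup f))))).sum ≤ config.length
instance (config : List (List (String × String))) (remove : List (List (String × String))) (fields : List String) : Decidable (Pre_diff_config config remove fields) := by unfold Pre_diff_config; infer_instance

def pvWitness_diff_config : (List (List (String × String))) × (List (List (String × String))) × List String :=
  ([[("a", "1")], [("a", "2")]], [[("a", "2")]], ["a"])

-- On inputs where some config entry matches two or more remove entries, A appends its index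
-- once per match and the repeated deletion also removes subsequent unrelated entries; B
-- removes exactly the matching entries, which is the intended behaviour.
def D_diff_config (config : List (List (String × String))) (remove : List (List (String × String))) (fields : List String) : Prop :=
  ∃ a ∈ config, 2 ≤ remove.countP (fun b => fields.all (fun f =>
      (a.lookup f).isSome && (b.lookup f).isSome && (a.lookup f == b.lookup f)))
instance (config : List (List (String × String))) (remove : List (List (String × String))) (fields : List String) : Decidable (D_diff_config config remove fields) := by unfold D_diff_config; infer_instance

def Spec_diff_config (config : List (List (String × String))) (remove : List (List (String × String))) (fields : List String) (out : List (List (String × String))) : Prop := ¬ D_diff_config config remove fields → out = diff_config_alt config remove fields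
instance (config : List (List (String × String))) (remove : List (List (String × String))) (fields : List String) (out : List (List (String × String))) : Decidable (Spec_diff_config config remove fields out) := by unfold Spec_diff_config; infer_instance

def pvDiffWitness_diff_config : (List (List (String × String))) × (List (List (String × String))) × List String :=
  ([[("a", "1")], [("b", "2")]], [[("a", "1")], [("a", "1")]], ["a"])

def pvDiffWitnessOut_diff_config : (List (List (String × String))) × (List (List (String × String))) :=
  ([], [[("b", "2")]])

-- ===== CLAIM (what is proved, stated in full; the proofs are below) =====
def Claim_unchanged_diff_config : Prop := ∀ (config : List (List (String × String))) (remove : List (List (String × String))) (fields : List String), Dom_diff_config config remove fields → Pre_diff_config config remove fields → Spec_diff_config config remove fields (diff_config config remove fields)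
def Claim_changed_diff_config : Prop := Dom_diff_config (pvDiffWitness_diff_config.1) (pvDiffWitness_diff_config.2.1) (pvDiffWitness_diff_config.2.2) ∧ Pre_diff_config (pvDiffWitness_diff_config.1) (pvDiffWitness_diff_config.2.1) (pvDiffWitness_diff_config.2.2) ∧ D_diff_config (pvDiffWitness_diff_config.1) (pvDiffWitness_diff_config.2.1) (pvDiffWitness_diff_config.2.2) ∧ diff_config (pvDiffWitness_diff_config.1) (pvDiffWitness_diff_config.2.1) (pvDiffWitness_diff_config.2.2) = pvDiffWitnessOut_diff_config.1 ∧ diff_config_alt (pvDiffWitness_diff_config.1) (pvDiffWitness_diff_config.2.1) (pvDiffWitness_diff_config.2.2) = pvDiffWitnessOut_diff_config.2 ∧ pvDiffWitnessOut_diff_config.1 ≠ pvDiffWitnessOut_diff_config.2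
def Claim_exact_diff_config : Prop := ∀ (config : List (List (String × String))) (remove : List (List (String × String))) (fields : List String), Dom_diff_config config remove fields → Pre_diff_config config remove fields → D_diff_config config remove fields → diff_config config remove fields ≠ diff_config_alt config remove fields

-- ===== LEMMAS AND PROOFS =====

-- number of remove entries matching a given config entry on all fields (proof-side notion)
def pvCnt (remove : List (List (String × String))) (fields : List String) (a : List (String × String)) : Nat :=
  remove.countP (fun b => pvMatch fields a b)

-- pvGetK is List.lookup
theorem pvGetK_eq_lookup (d : List (String × String)) (f : String) :
    pvGetK d f = d.lookup f := by
  induction d with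
  | nil => rfl
  | cons x r ih =>
    cases x with
    | mk k v =>
      by_cases h : k = f
      · subst h; simp [pvGetK, List.lookup]
      · have hb : (f == k) = false := beq_eq_false_iff_ne.mpr (Ne.symm h)
        simp [pvGetK, List.lookup, ih, h, hb]

-- D_ in terms of pvCnt
theorem D_iff (config remove : List (List (String × String))) (fields : List String) :
    D_diff_config config remove fields ↔ ∃ a ∈ config, 2 ≤ pvCnt remove fields a := by
  unfold D_diff_config pvCnt pvMatch
  simp only [pvGetK_eq_lookup]

-- 'del' at a nonnegative index, characterised
theorem pvDel_natCast {α : Type} (c : List α) (m : Nat) :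
    pvDel c (m : Int) = if m < c.length then c.eraseIdx m else c := by
  by_cases h : m < c.length
  · simp [pvDel, PySem.List.pop?, PySem.List.pyIdx?, h]
  · simp [pvDel, PySem.List.pop?, PySem.List.pyIdx?, h]

-- deleting at index m never changes the first m elements
theorem take_pvDel {α : Type} (c : List α) (m : Nat) :
    (pvDel c (m : Int)).take m = c.take m := by
  rw [pvDel_natCast]
  split_ifs with h
  · rw [List.eraseIdx_eq_take_drop_succ, List.take_append_of_le_length, List.take_take]
    · simp
    · simp; omega
  · rfl

-- if some field is missing from a, a matches nothing
theorem pvMatch_of_key_none (fields : List String) (a b : List (String × String))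
    (h : pvKey fields a = none) : pvMatch fields a b = false := by
  induction fields with
  | nil => simp [pvKey] at h
  | cons f rest ih =>
    simp only [pvKey] at h
    simp only [pvMatch, List.all_cons]
    cases hf : pvGetK a f with
    | none => simp
    | some v =>
      rw [hf] at h
      cases hr : pvKey rest a with
      | none => have := ih hr; simp only [pvMatch] at this; simp [this]
      | some vs => simp [hr] at h

-- if a's key is k, matching a is exactly having key k
theorem pvMatch_iff_key (fields : List String) (a b : List (String × String)) (k : List String)
    (h : pvKey fields a = some k) : pvMatch fields a b = true ↔ pvKey fields b = some k := by
  induction fields generalizing k with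
  | nil =>
    simp only [pvKey] at h ⊢
    cases h
    simp [pvMatch]
  | cons f rest ih =>
    simp only [pvKey] at h ⊢
    cases hf : pvGetK a f with
    | none => rw [hf] at h; cases h
    | some v =>
      rw [hf] at h
      cases hr : pvKey rest a with
      | none => simp [hr] at h
      | some vs =>
        rw [hr] at h
        cases h
        cases hbf : pvGetK b f with
        | none => simp [pvMatch, List.all_cons, hf, hbf]
        | some w =>
          have ihr : pvMatch rest a b = true ↔ pvKey rest b = some vs := ih vs hr
          cases hbr : pvKey rest b with
          | none =>
            simp only [pvMatch, List.all_cons, hf, hbf, Option.isSome_some, Bool.true_and,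
              Bool.and_eq_true, beq_iff_eq, Option.some.injEq]
            constructor
            · rintro ⟨-, hm⟩
              have := ihr.mp hm
              simp [hbr] at this
            · rintro ⟨⟩
          | some ws =>
            have ihr' : pvMatch rest a b = true ↔ ws = vs := by
              rw [ihr, hbr]; simp
            simp only [pvMatch, List.all_cons, hf, hbf, Option.isSome_some, Bool.true_and,
              Bool.and_eq_true, beq_iff_eq, Option.some.injEq, List.cons.injEq]
            rw [show (rest.all fun f => (pvGetK a f).isSome && (pvGetK b f).isSome &&
                  pvGetK a f == pvGetK b f) = pvMatch rest a b from rfl, ihr']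
            constructor <;> rintro ⟨h1, h2⟩ <;> exact ⟨h1.symm, h2⟩

-- pvCnt is 0 when the key is missing
theorem pvCnt_of_key_none (remove : List (List (String × String))) (fields : List String)
    (a : List (String × String)) (h : pvKey fields a = none) : pvCnt remove fields a = 0 := by
  unfold pvCnt
  rw [List.countP_eq_zero]
  intro b _
  simp [pvMatch_of_key_none fields a b h]

-- B's membership test computes 'pvCnt > 0' when a has a key
theorem mem_keys_iff_cnt_pos (remove : List (List (String × String))) (fields : List String)
    (a : List (String × String)) (k : List String) (h : pvKey fields a = some k) :
    (PySem.Set.contains (PySem.Set.ofList (remove.filterMap (fun b => pvKey fields b))) k = true)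
      ↔ 0 < pvCnt remove fields a := by
  rw [show (PySem.Set.contains (PySem.Set.ofList (remove.filterMap (fun b => pvKey fields b))) k = true)
        ↔ k ∈ PySem.Set.ofList (remove.filterMap (fun b => pvKey fields b)) by
      simp [PySem.Set.contains]]
  rw [PySem.Set.mem_ofList, List.mem_filterMap]
  unfold pvCnt
  rw [List.countP_pos_iff]
  constructor
  · rintro ⟨b, hb, hk⟩
    exact ⟨b, hb, (pvMatch_iff_key fields a b k h).mpr hk⟩
  · rintro ⟨b, hb, hm⟩
    exact ⟨b, hb, (pvMatch_iff_key fields a b k h).mp hm⟩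

-- B is the pvCnt = 0 filter
theorem alt_eq_filter (config remove : List (List (String × String))) (fields : List String) :
    diff_config_alt config remove fields
      = config.filter (fun a => pvCnt remove fields a == 0) := by
  unfold diff_config_alt
  apply List.filter_congr
  intro a _
  cases hk : pvKey fields a with
  | none => simp [pvCnt_of_key_none remove fields a hk]
  | some k =>
    by_cases hm : PySem.Set.contains (PySem.Set.ofList (remove.filterMap (fun b => pvKey fields b))) k = true
    · have hp := (mem_keys_iff_cnt_pos remove fields a k hk).mp hm
      have hne : pvCnt remove fields a ≠ 0 := by omega
      dsimp only
      rw [hm]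
      simp [hne]
    · have hz : pvCnt remove fields a = 0 := by
        by_contra h
        exact hm ((mem_keys_iff_cnt_pos remove fields a k hk).mpr (by omega))
      simp only [Bool.not_eq_true] at hm
      dsimp only
      rw [hm]
      simp [hz]

-- A's removed list in closed form
theorem removed_eq (remove : List (List (String × String))) (fields : List String) :
    ∀ (xs : List (List (String × String))) (s : Int) (acc : List Int),
      (PySem.List.enumerate xs s).foldl
        (fun acc ia => remove.foldl (fun acc2 b => if pvMatch fields ia.2 b then acc2 ++ [ia.1] else acc2) acc) acc
      = acc ++ (PySem.List.enumerate xs s).flatMap (fun ia => List.replicate (pvCnt remove fields ia.2) ia.1) := by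
  intro xs
  induction xs with
  | nil => simp [PySem.List.enumerate_nil]
  | cons x xs ih =>
    intro s acc
    rw [PySem.List.enumerate_cons, List.foldl_cons, List.flatMap_cons]
    rw [PySem.List.foldl_append_if (fun b => pvMatch fields x b) (fun _ => (s : Int)) remove acc]
    rw [ih]
    rw [← List.append_assoc]
    congr 2
    rw [List.map_const']
    unfold pvCnt
    rw [List.countP_eq_length_filter]

-- the descending deletion pass, when every entry matches at most once, is the filter
theorem bridge (config remove : List (List (String × String))) (fields : List String)
    (hcnt : ∀ a ∈ config, pvCnt remove fields a ≤ 1) :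
    ∀ (m : Nat), m ≤ config.length → ∀ (out : List (List (String × String))),
      out.take m = config.take m →
      (PySem.List.pyRange ((m : Int) - 1) (-1) (-1)).foldl
        (fun out j => (List.replicate (pvCnt remove fields (PySem.List.pyGetD config j [])) j).foldl (fun c i => pvDel c i) out) out
      = (config.take m).filter (fun a => pvCnt remove fields a == 0) ++ out.drop m := by
  intro m
  induction m with
  | zero =>
    intro _ out _
    rw [PySem.List.pyRange_neg_one_eq_nil (by norm_num)]
    simp
  | succ m ih =>
    intro hm out hout
    have hcons : PySem.List.pyRange ((((m + 1 : Nat)) : Int) - 1) (-1) (-1)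
        = (m : Int) :: PySem.List.pyRange ((m : Int) - 1) (-1) (-1) := by
      have he : ((((m + 1 : Nat)) : Int) - 1) = (m : Int) := by push_cast; ring
      rw [he, PySem.List.pyRange_neg_one_cons (by omega)]
    rw [hcons, List.foldl_cons]
    have hmlt : m < config.length := by omega
    have hlen : m + 1 ≤ out.length := by
      have := congrArg List.length hout
      simp at this
      omega
    have hget : out[m]? = some config[m] := by
      have h1 := congrArg (fun l => l[m]?) hout
      simp only [List.getElem?_take, if_pos (Nat.lt_succ_self m)] at h1
      rw [h1, List.getElem?_eq_getElem hmlt]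
    have hgetD : PySem.List.pyGetD config (m : Int) [] = config[m] := by
      rw [PySem.List.pyGetD_natCast, List.getD_eq_getElem?_getD, List.getElem?_eq_getElem hmlt]
      rfl
    have htake : config.take (m + 1) = config.take m ++ [config[m]] := by
      rw [List.take_add_one, List.getElem?_eq_getElem hmlt]
      rfl
    have hdropout : out.drop m = config[m] :: out.drop (m + 1) := by
      have := List.getElem_cons_drop (as := out) (i := m) (h := by omega)
      rw [← this]
      congr 1
      have h1 := congrArg (fun l => l[m]?) hout
      simp only [List.getElem?_take, if_pos (Nat.lt_succ_self m)] at h1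
      rw [List.getElem?_eq_getElem hmlt] at h1
      have h2 := List.getElem?_eq_getElem (l := out) (i := m) (by omega)
      rw [h1] at h2
      exact (Option.some.injEq _ _).mp h2.symm
    have hc := hcnt config[m] (List.getElem_mem hmlt)
    interval_cases hcm : (pvCnt remove fields config[m])
    · -- cnt = 0 : entry kept, nothing deleted
      rw [hgetD, hcm]
      simp only [List.replicate, List.foldl_nil]
      rw [ih (by omega) out (by
        have := congrArg (List.take m) hout
        simpa [List.take_take, Nat.min_eq_left (Nat.le_succ m)] using this)]
      rw [htake, List.filter_append]
      simp [hcm, hdropout]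
    · -- cnt = 1 : one deletion at m
      rw [hgetD, hcm]
      simp only [List.replicate, List.foldl_cons, List.foldl_nil]
      rw [ih (by omega) (pvDel out (m : Int)) (by
        rw [take_pvDel]
        have := congrArg (List.take m) hout
        simpa [List.take_take, Nat.min_eq_left (Nat.le_succ m)] using this)]
      rw [htake, List.filter_append]
      have hdel : pvDel out (m : Int) = out.take m ++ out.drop (m + 1) := by
        rw [pvDel_natCast, if_pos (by omega), List.eraseIdx_eq_take_drop_succ]
      have hdropdel : (pvDel out (m : Int)).drop m = out.drop (m + 1) := by
        rw [hdel, List.drop_append_of_le_length (by simp; omega)]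
        rw [List.drop_eq_nil_of_le (by simp), List.nil_append]
      rw [hdropdel]
      simp [hcm]

-- A as the descending deletion fold (shared by the equality and the tightness proofs)
theorem A_eq_fold (config remove : List (List (String × String))) (fields : List String) :
    diff_config config remove fields
      = (PySem.List.pyRange ((config.length : Int) - 1) (-1) (-1)).foldl
          (fun out j => (List.replicate (pvCnt remove fields (PySem.List.pyGetD config j [])) j).foldl (fun c i => pvDel c i) out) config := by
  unfold diff_config
  dsimp only
  rw [removed_eq remove fields config 0 []]
  rw [List.nil_append, List.reverse_flatMap]
  rw [List.foldl_flatMap]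
  rw [PySem.List.enumerate_eq_map_pyRange config []]
  rw [← List.map_reverse]
  have hrev : (PySem.List.pyRange 0 (PySem.List.len config) 1).reverse
      = PySem.List.pyRange ((config.length : Int) - 1) (-1) (-1) := by
    rw [PySem.List.pyRange_neg_one_eq_reverse]
    norm_num [PySem.List.len_eq]
  rw [hrev, List.foldl_map]
  simp only [List.reverse_replicate, Function.comp]

-- a fold of deletions over replicate is an iterate
theorem foldl_replicate_iterate {α β : Type} (k : Nat) (x : α) (f : β → α → β) (init : β) :
    (List.replicate k x).foldl f init = (fun b => f b x)^[k] init := by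
  induction k generalizing init with
  | zero => rfl
  | succ k ih => simp [List.replicate_succ, List.foldl_cons, ih, Function.iterate_succ_apply]

-- k in-range deletions at index m remove the elements m .. m+k-1
theorem iterate_pvDel {α : Type} (k m : Nat) :
    ∀ (out : List α), m + k ≤ out.length →
      (fun o => pvDel o (m : Int))^[k] out = out.take m ++ out.drop (m + k) := by
  induction k with
  | zero => intro out h; simp
  | succ k ih =>
    intro out h
    rw [Function.iterate_succ_apply]
    have hm : m < out.length := by omega
    have hdel : pvDel out (m : Int) = out.take m ++ out.drop (m + 1) := by
      rw [pvDel_natCast, if_pos hm, List.eraseIdx_eq_take_drop_succ]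
    rw [hdel]
    have hlen : (out.take m).length = m := by simp; omega
    rw [ih (out.take m ++ out.drop (m + 1)) (by simp; omega)]
    congr 1
    · rw [List.take_append_of_le_length (le_of_eq hlen.symm)]
      simp [List.take_take]
    · rw [List.drop_append, List.drop_eq_nil_of_le (by rw [hlen]; omega), List.nil_append,
        hlen, List.drop_drop]
      congr 1
      omega

-- the lookup-phrased count in Pre_/D_ is pvCnt
theorem cnt_pointwise (remove : List (List (String × String))) (fields : List String)
    (a : List (String × String)) :
    remove.countP (fun b => fields.all (fun f =>
        (a.lookup f).isSome && (b.lookup f).isSome && (a.lookup f == b.lookup f)))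
      = pvCnt remove fields a := by
  unfold pvCnt pvMatch
  simp only [pvGetK_eq_lookup]

theorem pre_cnt (config remove : List (List (String × String))) (fields : List String)
    (hpre : Pre_diff_config config remove fields) :
    ∀ j, (hj : j < config.length) → 0 < pvCnt remove fields config[j] →
      j + ((config.drop j).map (pvCnt remove fields)).sum ≤ config.length := by
  intro j hj hc
  have h := hpre j hj
  simp only [cnt_pointwise] at h
  exact h hc

-- length of the descending deletion pass under the no-IndexError condition
theorem bridge_len (config remove : List (List (String × String))) (fields : List String) :
    ∀ (m : Nat) (hm : m ≤ config.length), ∀ (out : List (List (String × String))),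
      out.take m = config.take m →
      (∀ j, (hj : j < m) → 0 < pvCnt remove fields (config[j]'(Nat.lt_of_lt_of_le hj hm)) →
          j + (((config.take m).drop j).map (pvCnt remove fields)).sum ≤ out.length) →
      ((PySem.List.pyRange ((m : Int) - 1) (-1) (-1)).foldl
        (fun out j => (List.replicate (pvCnt remove fields (PySem.List.pyGetD config j [])) j).foldl (fun c i => pvDel c i) out) out).length
      = out.length - ((config.take m).map (pvCnt remove fields)).sum := by
  intro m
  induction m with
  | zero =>
    intro _ out _ _
    rw [PySem.List.pyRange_neg_one_eq_nil (by norm_num)]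
    simp
  | succ m ih =>
    intro hm out hout hcond
    have hcons : PySem.List.pyRange ((((m + 1 : Nat)) : Int) - 1) (-1) (-1)
        = (m : Int) :: PySem.List.pyRange ((m : Int) - 1) (-1) (-1) := by
      have he : ((((m + 1 : Nat)) : Int) - 1) = (m : Int) := by push_cast; ring
      rw [he, PySem.List.pyRange_neg_one_cons (by omega)]
    rw [hcons, List.foldl_cons]
    have hmlt : m < config.length := by omega
    have hlen1 : m + 1 ≤ out.length := by
      have := congrArg List.length hout
      simp at this
      omega
    have hgetD : PySem.List.pyGetD config (m : Int) [] = config[m] := by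
      rw [PySem.List.pyGetD_natCast, List.getD_eq_getElem?_getD, List.getElem?_eq_getElem hmlt]
      rfl
    have htake : config.take (m + 1) = config.take m ++ [config[m]] := by
      rw [List.take_add_one, List.getElem?_eq_getElem hmlt]
      rfl
    have hl : (config.take m).length = m := by simp; omega
    have hsum1 : (((config.take (m + 1)).drop m).map (pvCnt remove fields)).sum
        = pvCnt remove fields config[m] := by
      rw [htake, List.drop_append, List.drop_eq_nil_of_le (le_of_eq hl), hl, List.nil_append,
        Nat.sub_self]
      simp
    have hmc : m + pvCnt remove fields config[m] ≤ out.length := by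
      by_cases h0 : 0 < pvCnt remove fields config[m]
      · have h := hcond m (Nat.lt_succ_self m) h0
        omega
      · omega
    rw [hgetD, foldl_replicate_iterate, iterate_pvDel _ _ out hmc]
    have hlt : (out.take m).length = m := by simp; omega
    have hout'len : (out.take m ++ out.drop (m + pvCnt remove fields config[m])).length
        = out.length - pvCnt remove fields config[m] := by
      simp
      omega
    have houttm : out.take m = config.take m := by
      have h2 := congrArg (List.take m) hout
      simpa [List.take_take, Nat.min_eq_left (Nat.le_succ m)] using h2
    have hout'take : (out.take m ++ out.drop (m + pvCnt remove fields config[m])).take m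
        = config.take m := by
      rw [List.take_append_of_le_length (le_of_eq hlt.symm), List.take_take]
      simp [houttm]
    have hcond' : ∀ j, (hj : j < m) → 0 < pvCnt remove fields (config[j]'(Nat.lt_of_lt_of_le hj (Nat.le_of_succ_le hm))) →
        j + (((config.take m).drop j).map (pvCnt remove fields)).sum
          ≤ (out.take m ++ out.drop (m + pvCnt remove fields config[m])).length := by
      intro j hj h0
      have h := hcond j (by omega) h0
      have hsplit : (config.take (m + 1)).drop j = ((config.take m).drop j) ++ [config[m]] := by
        rw [htake, List.drop_append, hl, Nat.sub_eq_zero_of_le (by omega), List.drop_zero]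
      rw [hsplit, List.map_append, List.sum_append, List.map_cons, List.map_nil,
        List.sum_cons, List.sum_nil] at h
      rw [hout'len]
      omega
    rw [ih (by omega) _ hout'take hcond']
    have hsum2 : ((config.take (m + 1)).map (pvCnt remove fields)).sum
        = ((config.take m).map (pvCnt remove fields)).sum + pvCnt remove fields config[m] := by
      rw [htake, List.map_append, List.sum_append, List.map_cons, List.map_nil,
        List.sum_cons, List.sum_nil]
      omega
    rw [hout'len, hsum2]
    omega

-- counting entries with a positive count is at most the total count …
theorem countP_le_sum {X : Type} (cnt : X → Nat) (l : List X) :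
    l.countP (fun x => decide (0 < cnt x)) ≤ (l.map cnt).sum := by
  induction l with
  | nil => simp
  | cons x t ih =>
    rw [List.countP_cons, List.map_cons, List.sum_cons]
    by_cases h : 0 < cnt x
    · simp [h]
      omega
    · simp [h]
      omega

-- … and strictly less as soon as one entry counts at least twice
theorem countP_lt_sum {X : Type} (cnt : X → Nat) (l : List X) (a : X) (ha : a ∈ l)
    (h2 : 2 ≤ cnt a) :
    l.countP (fun x => decide (0 < cnt x)) + 1 ≤ (l.map cnt).sum := by
  induction l with
  | nil => cases ha
  | cons x t ih =>
    rw [List.countP_cons, List.map_cons, List.sum_cons]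
    rcases List.mem_cons.mp ha with rfl | hm
    · have hle := countP_le_sum cnt t
      have hx : decide (0 < cnt a) = true := by simp; omega
      rw [hx]
      simp
      omega
    · have hih := ih hm
      by_cases h : 0 < cnt x
      · simp [h]
        omega
      · simp [h]
        omega

-- zero-count and positive-count entries partition the list
theorem countP_zero_add_pos {X : Type} (cnt : X → Nat) (l : List X) :
    l.countP (fun x => cnt x == 0) + l.countP (fun x => decide (0 < cnt x)) = l.length := by
  induction l with
  | nil => simp
  | cons x t ih =>
    rw [List.countP_cons, List.countP_cons, List.length_cons]
    by_cases h : cnt x = 0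
    · have h1 : (cnt x == 0) = true := by simp [h]
      have h2 : decide (0 < cnt x) = false := by simp; omega
      rw [h1, h2]
      simp
      omega
    · have h1 : (cnt x == 0) = false := by simp [h]
      have h2 : decide (0 < cnt x) = true := by simp; omega
      rw [h1, h2]
      simp
      omega

-- the no-IndexError condition bounds the total count by the list length
theorem sum_le_of_cond {X : Type} (cnt : X → Nat) :
    ∀ (l : List X) (L : Nat),
      (∀ j, (hj : j < l.length) → 0 < cnt l[j] → j + ((l.drop j).map cnt).sum ≤ L) →
      (l.map cnt).sum ≤ L := by
  intro l
  induction l with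
  | nil => intro L _; simp
  | cons x t ih =>
    intro L h
    by_cases h0 : 0 < cnt x
    · have := h 0 (by simp) (by simpa)
      simpa using this
    · have hx : cnt x = 0 := by omega
      rw [List.map_cons, List.sum_cons, hx, Nat.zero_add]
      apply ih
      intro j hj hc
      have hle := h (j + 1) (by simp; omega) (by simpa using hc)
      simp only [List.drop_succ_cons] at hle
      omega

-- A's output length under Pre_
theorem A_len (config remove : List (List (String × String))) (fields : List String)
    (hpre : Pre_diff_config config remove fields) :
    (diff_config config remove fields).length
      = config.length - (config.map (pvCnt remove fields)).sum := by
  rw [A_eq_fold]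
  have hc : ∀ j, (hj : j < config.length) → 0 < pvCnt remove fields config[j] →
      j + (((config.take config.length).drop j).map (pvCnt remove fields)).sum ≤ config.length := by
    intro j hj h0
    have := pre_cnt config remove fields hpre j hj h0
    simpa [List.take_length] using this
  have h := bridge_len config remove fields config.length le_rfl config rfl hc
  simpa [List.take_length] using h

-- B's output length
theorem alt_len (config remove : List (List (String × String))) (fields : List String) :
    (diff_config_alt config remove fields).length
      = config.countP (fun a => pvCnt remove fields a == 0) := by
  rw [alt_eq_filter, List.countP_eq_length_filter]

-- ===== VERDICT (by name: the statement is the Claim_ definition above) =====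
theorem diff_config_spec : Claim_unchanged_diff_config := by
  intro config remove fields _ _ hnd
  have hcnt : ∀ a ∈ config, pvCnt remove fields a ≤ 1 := by
    intro a ha
    by_contra h
    exact hnd ((D_iff config remove fields).mpr ⟨a, ha, by omega⟩)
  rw [A_eq_fold, bridge config remove fields hcnt config.length le_rfl config rfl,
    List.take_length, List.drop_length, List.append_nil, alt_eq_filter]

theorem diff_config_changed : Claim_changed_diff_config := by
  unfold Claim_changed_diff_config; decide

theorem diff_config_tight : Claim_exact_diff_config := by
  intro config remove fields _ hpre hd heq
  obtain ⟨a, ha, h2⟩ := (D_iff config remove fields).mp hd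
  have hA := A_len config remove fields hpre
  have hB := alt_len config remove fields
  have hlen := congrArg List.length heq
  rw [hA, hB] at hlen
  have hMC : (config.map (pvCnt remove fields)).sum ≤ config.length :=
    sum_le_of_cond (pvCnt remove fields) config config.length (pre_cnt config remove fields hpre)
  have hKM := countP_lt_sum (pvCnt remove fields) config a ha h2
  have hcomp := countP_zero_add_pos (pvCnt remove fields) config
  omega
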